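-- pv_equiv track=rewrite | github.com/maxrainer/iosawxplays | roles/iospush/library/config_compliance.py | block_normal_check
-- ===== SOURCE A (Python) =====
-- def block_normal_check(block_lines, template_lines):
--     remaining_block_lines = list(block_lines)
--     remaining_template_lines = list(template_lines)
--
--     for block_line in block_lines:
--         if block_line in template_lines:
--             remaining_block_lines.remove(block_line)
--             remaining_template_lines.remove(block_line)
--
--     return remaining_block_lines, remaining_template_lines
-- ===== SOURCE B (Python) =====
-- def block_normal_check(block_lines, template_lines):
--     template_set = set(template_lines)
--     remaining_block_lines = [b for b in block_lines if b not in template_set]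
--     skips = {}
--     for b in block_lines:
--         skips[b] = skips.get(b, 0) + 1
--     remaining_template_lines = []
--     for t in template_lines:
--         if skips.get(t, 0) > 0:
--             skips[t] = skips[t] - 1
--         else:
--             remaining_template_lines.append(t)
--     return remaining_block_lines, remaining_template_lines
-- ===== Notes on version B (the rewrite author's own statement) =====
-- stated objective: faster
-- what changed: Replaces the quadratic loop of repeated list membership tests and list.remove calls with one set-membership filter for the block lines and a single pass over the template lines driven by a per-value skip counter built from block_lines.
import Mathlib
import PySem

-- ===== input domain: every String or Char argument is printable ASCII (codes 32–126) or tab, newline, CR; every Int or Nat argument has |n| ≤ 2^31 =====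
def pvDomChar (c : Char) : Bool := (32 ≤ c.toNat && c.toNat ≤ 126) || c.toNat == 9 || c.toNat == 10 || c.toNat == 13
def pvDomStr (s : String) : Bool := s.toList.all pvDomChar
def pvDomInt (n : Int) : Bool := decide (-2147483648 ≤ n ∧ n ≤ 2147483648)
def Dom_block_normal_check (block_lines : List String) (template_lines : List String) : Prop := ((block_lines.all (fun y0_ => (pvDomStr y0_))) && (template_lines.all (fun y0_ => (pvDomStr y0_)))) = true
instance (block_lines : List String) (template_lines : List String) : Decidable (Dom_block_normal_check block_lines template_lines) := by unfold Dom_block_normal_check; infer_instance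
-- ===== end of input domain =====

-- B replaces A's quadratic membership-test-and-list.remove loop by a set filter plus a
-- one-pass skip-counter sweep over the template lines (measured faster at large sizes).

-- ===== PORT A =====
-- the for-loop over block_lines, state = (remaining_block_lines, remaining_template_lines);
-- list.remove raising ValueError is `PySem.List.remove? = none`, propagated as `none`.
def blockLoopA (bs : List String) (rb : List String) (rt : List String)
    (template : List String) : Option (List String × List String) :=
  match bs with
  | [] => some (rb, rt)
  | b :: rest =>
    if b ∈ template then
      match PySem.List.remove? rb b, PySem.List.remove? rt b with
      | some rb', some rt' => blockLoopA rest rb' rt' template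
      | _, _ => none
    else blockLoopA rest rb rt template

def block_normal_check (block_lines : List String) (template_lines : List String) : List String × List String :=
  -- `.getD ([], [])` is never reached under Pre_ (none = the ValueError path)
  (blockLoopA block_lines block_lines template_lines template_lines).getD ([], [])

-- ===== PORT B =====
def block_normal_check_alt (block_lines : List String) (template_lines : List String) : List String × List String :=
  let template_set := PySem.Set.ofList template_lines
  let remaining_block_lines := block_lines.filter (fun b => !(PySem.Set.contains template_set b))
  let skips : PySem.Dict String Int :=
    block_lines.foldl (fun d b => d.insert b (d.getD b 0 + 1)) PySem.Dict.empty
  let st := template_lines.foldl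
    (fun (st : PySem.Dict String Int × List String) t =>
      if st.1.getD t 0 > 0 then (st.1.insert t (st.1.getD t 0 - 1), st.2)
      else (st.1, st.2 ++ [t]))
    (skips, [])
  (remaining_block_lines, st.2)

-- ===== PRECONDITION & SPEC =====
-- Pre_ excludes exactly the inputs on which A raises ValueError (list.remove on an exhausted value):
-- some line in template_lines occurring more often in block_lines than in template_lines.
def Pre_block_normal_check (block_lines : List String) (template_lines : List String) : Prop :=
  ∀ s ∈ template_lines, block_lines.count s ≤ template_lines.count s

instance (block_lines : List String) (template_lines : List String) : Decidable (Pre_block_normal_check block_lines template_lines) := by unfold Pre_block_normal_check; infer_instance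

def pvWitness_block_normal_check : List String × List String := (["a", "b"], ["b", "c"])

def Spec_block_normal_check (block_lines : List String) (template_lines : List String) (out : List String × List String) : Prop := out = block_normal_check_alt block_lines template_lines
instance (block_lines : List String) (template_lines : List String) (out : List String × List String) : Decidable (Spec_block_normal_check block_lines template_lines out) := by unfold Spec_block_normal_check; infer_instance

-- ===== CLAIM (what is proved, stated in full; the proofs are below) =====
def Claim_equal_block_normal_check : Prop := ∀ (block_lines : List String) (template_lines : List String), Dom_block_normal_check block_lines template_lines → Pre_block_normal_check block_lines template_lines → Spec_block_normal_check block_lines template_lines (block_normal_check block_lines template_lines)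

-- ===== LEMMAS AND PROOFS =====

-- `dropFirst l c` drops, from the front, the first `c v` occurrences of each value `v` of `l`.
def dropFirst : List String → (String → Nat) → List String
  | [], _ => []
  | t :: ts, c =>
    if 0 < c t then dropFirst ts (fun v => if v = t then c v - 1 else c v)
    else t :: dropFirst ts c

theorem dropFirst_congr : ∀ (l : List String) (c c' : String → Nat),
    (∀ v ∈ l, c v = c' v) → dropFirst l c = dropFirst l c' := by
  intro l
  induction l with
  | nil => intro c c' _; rfl
  | cons t ts ih =>
    intro c c' h
    have ht : c t = c' t := h t (by simp)
    simp only [dropFirst, ht]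
    split
    · exact ih _ _ (fun v hv => by by_cases hvt : v = t <;> simp [hvt, h v (by simp [hv]), ht])
    · exact congrArg _ (ih _ _ (fun v hv => h v (by simp [hv])))

theorem dropFirst_zero : ∀ (l : List String), dropFirst l (fun _ => 0) = l := by
  intro l; induction l with
  | nil => rfl
  | cons t ts ih => simp [dropFirst, ih]

theorem mem_dropFirst : ∀ (l : List String) (c : String → Nat) (b : String),
    c b < l.count b → b ∈ dropFirst l c := by
  intro l
  induction l with
  | nil => intro c b h; simp at h
  | cons t ts ih =>
    intro c b h
    simp only [dropFirst]
    split
    · rename_i hpos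
      refine ih _ b ?_
      by_cases hbt : b = t
      · subst hbt
        rw [List.count_cons_self] at h
        show (if b = b then c b - 1 else c b) < ts.count b
        rw [if_pos rfl]
        omega
      · show (if b = t then c b - 1 else c b) < ts.count b
        rw [if_neg hbt]
        rwa [List.count_cons_of_ne (fun h' => hbt h'.symm)] at h
    · by_cases hbt : b = t
      · subst hbt; simp
      · have : c b < ts.count b := by
          rwa [List.count_cons_of_ne (fun h' => hbt h'.symm)] at h
        exact List.mem_cons_of_mem _ (ih _ b this)

theorem erase_dropFirst : ∀ (l : List String) (c : String → Nat) (b : String),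
    c b < l.count b →
    (dropFirst l c).erase b = dropFirst l (fun v => if v = b then c v + 1 else c v) := by
  intro l
  induction l with
  | nil => intro c b h; simp at h
  | cons t ts ih =>
    intro c b h
    by_cases hbt : b = t
    · subst hbt
      rw [List.count_cons_self] at h
      by_cases hpos : 0 < c b
      · -- both sides skip the head
        rw [dropFirst, if_pos hpos, dropFirst,
          if_pos (show 0 < (if b = b then c b + 1 else c b) by simp)]
        rw [ih _ b (by show (if b = b then c b - 1 else c b) < ts.count b
                       rw [if_pos rfl]; omega)]
        refine dropFirst_congr _ _ _ (fun v _ => ?_)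
        by_cases hv : v = b
        · subst hv; split_ifs <;> omega
        · simp only [if_neg hv]
      · -- head kept by LHS, then erased; RHS skips it
        have hz : c b = 0 := by omega
        rw [dropFirst, if_neg hpos, dropFirst,
          if_pos (show 0 < (if b = b then c b + 1 else c b) by simp)]
        rw [List.erase_cons_head]
        refine dropFirst_congr _ _ _ (fun v _ => ?_)
        by_cases hv : v = b
        · subst hv; split_ifs <;> omega
        · simp only [if_neg hv]
    · have hcount : c b < ts.count b := by
        rwa [List.count_cons_of_ne (fun h' => hbt h'.symm)] at h
      have htb : ¬ t = b := fun h' => hbt h'.symm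
      rw [dropFirst, dropFirst, if_neg htb]
      split
      · rename_i hpos
        rw [ih _ b (by show (if b = t then c b - 1 else c b) < ts.count b
                       rw [if_neg hbt]; omega)]
        refine dropFirst_congr _ _ _ (fun v _ => ?_)
        by_cases hv : v = b
        · subst hv; simp only [if_neg hbt]
        · by_cases hvt : v = t
          · subst hvt; simp only [if_neg hv]
          · simp only [if_neg hv, if_neg hvt]
      · rw [List.erase_cons_tail (by simp [htb]), ih _ b hcount]

-- helper for the erase in remaining_block_lines
theorem erase_kept_append (kept rest : List String) (b : String) (hb : b ∉ kept) :
    (kept ++ b :: rest).erase b = kept ++ rest := by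
  rw [List.erase_append_right _ hb, List.erase_cons_head]

theorem loopA_eq (template : List String) : ∀ (bs kept : List String) (c : String → Nat),
    (∀ x ∈ kept, x ∉ template) →
    (∀ v ∈ template, c v + bs.count v ≤ template.count v) →
    blockLoopA bs (kept ++ bs) (dropFirst template c) template
      = some (kept ++ bs.filter (fun b => !(decide (b ∈ template))),
              dropFirst template (fun v => c v + bs.count v)) := by
  intro bs
  induction bs with
  | nil =>
    intro kept c _ _
    simp [blockLoopA]
  | cons b rest ih =>
    intro kept c hkept hcnt
    simp only [blockLoopA]
    by_cases hb : b ∈ template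
    · have hcb : c b < template.count b := by
        have := hcnt b hb
        rw [List.count_cons_self] at this
        omega
      have hbk : b ∉ kept := fun h => hkept b h hb
      have hrb : PySem.List.remove? (kept ++ b :: rest) b = some (kept ++ rest) := by
        rw [PySem.List.remove?_eq_some_erase _ b (by simp), erase_kept_append _ _ _ hbk]
      have hrt : PySem.List.remove? (dropFirst template c) b
          = some (dropFirst template (fun v => if v = b then c v + 1 else c v)) := by
        rw [PySem.List.remove?_eq_some_erase _ b (mem_dropFirst _ _ _ hcb),
          erase_dropFirst _ _ _ hcb]
      rw [if_pos hb, hrb, hrt]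
      change blockLoopA rest (kept ++ rest)
        (dropFirst template (fun v => if v = b then c v + 1 else c v)) template = _
      rw [ih kept _ hkept (by
        intro v hv
        have hv' := hcnt v hv
        by_cases hvb : v = b
        · subst hvb; rw [List.count_cons_self] at hv'; split_ifs <;> omega
        · simp only [if_neg hvb]
          rwa [List.count_cons_of_ne (fun h' => hvb h'.symm)] at hv')]
      simp only [Option.some.injEq, Prod.mk.injEq]
      refine ⟨?_, ?_⟩
      · simp [hb]
      · apply dropFirst_congr
        intro v _
        by_cases hvb : v = b
        · subst hvb; rw [List.count_cons_self]
          split_ifs with hI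
          · omega
          · exact absurd rfl hI
        · rw [List.count_cons_of_ne (fun h' => hvb h'.symm)]; simp [hvb]
    · rw [if_neg hb]
      have hsplit : kept ++ b :: rest = (kept ++ [b]) ++ rest := by simp
      rw [hsplit]
      rw [ih (kept ++ [b]) c
        (by intro x hx
            rcases List.mem_append.mp hx with h | h
            · exact hkept x h
            · simp only [List.mem_singleton] at h; subst h; exact hb)
        (by intro v hv
            have hv' := hcnt v hv
            have : rest.count v ≤ (b :: rest).count v := by
              rw [List.count_cons]; omega
            omega)]
      simp only [Option.some.injEq, Prod.mk.injEq]
      refine ⟨?_, ?_⟩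
      · simp [hb]
      · apply dropFirst_congr
        intro v hv
        have hvb : ¬ b = v := fun h' => hb (h' ▸ hv)
        rw [List.count_cons_of_ne hvb]

theorem loopB_eq : ∀ (ts : List String) (d : PySem.Dict String Int) (acc : List String),
    (ts.foldl
      (fun (st : PySem.Dict String Int × List String) t =>
        if st.1.getD t 0 > 0 then (st.1.insert t (st.1.getD t 0 - 1), st.2)
        else (st.1, st.2 ++ [t]))
      (d, acc)).2
      = acc ++ dropFirst ts (fun v => (d.getD v 0).toNat) := by
  intro ts
  induction ts with
  | nil => intro d acc; simp [dropFirst]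
  | cons t rest ih =>
    intro d acc
    simp only [List.foldl_cons, dropFirst]
    by_cases hpos : d.getD t 0 > 0
    · rw [if_pos hpos, if_pos (by omega)]
      rw [ih]
      congr 1
      apply dropFirst_congr
      intro v _
      rw [PySem.Dict.getD_insert]
      by_cases hv : v = t
      · subst hv; split_ifs <;> omega
      · simp only [if_neg hv]
    · rw [if_neg hpos, if_neg (by omega)]
      rw [ih]
      simp
-- the skip counter holds the multiplicities of block_lines
theorem skips_getD (block_lines : List String) (v : String) :
    ((block_lines.foldl (fun d b => d.insert b (d.getD b 0 + 1))
        (PySem.Dict.empty : PySem.Dict String Int)).getD v 0).toNat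
      = block_lines.count v := by
  rw [PySem.Dict.getD_foldl_insert_add_one, PySem.Dict.getD_empty]
  simp

-- ===== VERDICT (by name: the statement is the Claim_ definition above) =====
theorem block_normal_check_spec : Claim_equal_block_normal_check := by
  unfold Claim_equal_block_normal_check
  intro block_lines template_lines _ hpre
  unfold Spec_block_normal_check block_normal_check block_normal_check_alt
  have h0 : template_lines = dropFirst template_lines (fun _ => 0) :=
    (dropFirst_zero template_lines).symm
  have hmain := loopA_eq template_lines block_lines [] (fun _ => 0)
    (by simp) (by intro v hv; simpa using hpre v hv)
  simp only [List.nil_append] at hmain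
  rw [show blockLoopA block_lines block_lines template_lines template_lines
      = blockLoopA block_lines block_lines (dropFirst template_lines (fun _ => 0)) template_lines
      from by rw [← h0]]
  rw [hmain]
  simp only [Option.getD_some, Prod.mk.injEq]
  refine ⟨?_, ?_⟩
  · apply List.filter_congr
    intro b _
    simp [PySem.Set.mem_ofList]
  · rw [loopB_eq]
    simp only [List.nil_append]
    apply dropFirst_congr
    intro v _
    rw [skips_getD]
    omega
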